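-- pv_equiv track=rewrite | github.com/Mateusz2734/agh | year_1/asd/offline_tasks/08/zad8.py | dfs
-- ===== SOURCE A (Python) =====
-- def dfs(M, i, j, visited):
--     m = len(M)
--     n = len(M[0])
--
--     if i < 0 or j < 0 or i > m - 1 or j > n - 1 or M[i][j] == 0 or visited[i][j]:
--         return 0, visited
--
--     visited[i][j] = True
--
--     suma = 0
--     suma += dfs(M, i - 1, j, visited)[0]
--     suma += dfs(M, i + 1, j, visited)[0]
--     suma += dfs(M, i, j - 1, visited)[0]
--     suma += dfs(M, i, j + 1, visited)[0]
--
--     return suma + M[i][j], visited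
-- ===== SOURCE B (Python) =====
-- def dfs(M, i, j, visited):
--     m = len(M)
--     n = len(M[0])
--     total = 0
--     stack = [(i, j)]
--     while stack:
--         r, c = stack.pop()
--         if r < 0 or c < 0 or r > m - 1 or c > n - 1 or M[r][c] == 0 or visited[r][c]:
--             continue
--         visited[r][c] = True
--         total += M[r][c]
--         stack.extend([(r, c + 1), (r, c - 1), (r + 1, c), (r - 1, c)])
--     return total, visited
-- ===== Notes on version B (the rewrite author's own statement) =====
-- stated objective: alternative
-- what changed: Replaces A's four-way recursive DFS by an iterative explicit-stack worklist loop with an accumulator (pop a cell, guard it, mark it, add its value, push its four neighbours).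
-- outside the precondition, e.g. on dfs([[1, 2], [3]], 1, 0, [[False, False], [False]]): A raises IndexError, B raises IndexError
import Mathlib
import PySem

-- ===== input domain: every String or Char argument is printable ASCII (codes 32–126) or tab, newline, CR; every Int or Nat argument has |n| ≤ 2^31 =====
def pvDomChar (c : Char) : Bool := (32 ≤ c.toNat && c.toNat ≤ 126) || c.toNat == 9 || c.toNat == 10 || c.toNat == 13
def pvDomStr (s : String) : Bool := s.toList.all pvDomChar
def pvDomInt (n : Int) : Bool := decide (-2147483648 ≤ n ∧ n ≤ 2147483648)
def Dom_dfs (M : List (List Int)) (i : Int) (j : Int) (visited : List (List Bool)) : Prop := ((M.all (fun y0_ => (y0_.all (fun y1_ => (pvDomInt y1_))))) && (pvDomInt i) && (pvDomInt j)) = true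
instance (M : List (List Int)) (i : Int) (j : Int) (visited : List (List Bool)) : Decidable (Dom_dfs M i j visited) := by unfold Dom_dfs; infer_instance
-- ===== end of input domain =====

-- B replaces A's four-way recursion by an iterative explicit-stack loop with an accumulator
-- (same return value, including the returned visited matrix; both Pythons mutate `visited`
-- in place identically, the equivalence proved here is about the returned pair).

-- ===== PORT A =====

-- shared lookup helpers: `M[i][j]` / `visited[i][j]` for indices the guard has already
-- checked to be nonnegative and in bounds (inside Pre_ the defaults are never used)
def getCell (M : List (List Int)) (i j : Int) : Int := (M.getD i.toNat []).getD j.toNat 0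
def getVis (v : List (List Bool)) (i j : Int) : Bool := (v.getD i.toNat []).getD j.toNat false
-- `visited[i][j] = True`
def markCell (v : List (List Bool)) (r c : Nat) : List (List Bool) :=
  v.set r ((v.getD r []).set c true)
-- number of unvisited cells: the fuel measure for A's recursion
def countFalse (v : List (List Bool)) : Nat := (v.map (fun r => r.count false)).sum

-- A's recursion, totalised with fuel (each recursive level marks one fresh cell, so
-- `countFalse visited + 1` fuel at the top is always enough inside Pre_; the fuel only
-- makes the port total, it never changes the computation)
def dfsFuel (M : List (List Int)) : Nat → Int → Int → List (List Bool) → Int × List (List Bool)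
  | 0, _, _, v => (0, v)
  | f + 1, i, j, v =>
    -- m = len(M), n = len(M[0])
    if i < 0 ∨ j < 0 ∨ i > (M.length : Int) - 1 ∨ j > ((M.headD []).length : Int) - 1 ∨
        getCell M i j = 0 ∨ getVis v i j then (0, v)
    else
      let v1 := markCell v i.toNat j.toNat
      let r1 := dfsFuel M f (i - 1) j v1
      let r2 := dfsFuel M f (i + 1) j r1.2
      let r3 := dfsFuel M f i (j - 1) r2.2
      let r4 := dfsFuel M f i (j + 1) r3.2
      (r1.1 + r2.1 + r3.1 + r4.1 + getCell M i j, r4.2)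

def dfs (M : List (List Int)) (i : Int) (j : Int) (visited : List (List Bool)) : Int × List (List Bool) :=
  dfsFuel M (countFalse visited + 1) i j visited

-- ===== PORT B =====

-- termination lemmas for the stack loop: marking an unvisited in-range cell strictly
-- decreases the number of unvisited cells
lemma count_set_true_lt (row : List Bool) : ∀ (c : Nat), row[c]? = some false →
    (row.set c true).count false < row.count false := by
  induction row with
  | nil => intro c h; simp at h
  | cons a t ih =>
    intro c h
    cases c with
    | zero =>
      simp only [List.getElem?_cons_zero, Option.some.injEq] at h
      subst h
      simp [List.count_cons]
    | succ c =>
      simp only [List.getElem?_cons_succ] at h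
      have := ih c h
      simp only [List.set_cons_succ, List.count_cons]
      omega

lemma countFalse_markCell_lt (v : List (List Bool)) : ∀ (r c : Nat),
    r < v.length → (v.getD r [])[c]? = some false →
    countFalse (markCell v r c) < countFalse v := by
  induction v with
  | nil => intro r c h _; simp at h
  | cons row t ih =>
    intro r c hr hc
    cases r with
    | zero =>
      simp only [List.getD_cons_zero] at hc
      have := count_set_true_lt row c hc
      simp only [markCell, List.getD_cons_zero, List.set_cons_zero, countFalse, List.map_cons,
        List.sum_cons]
      omega
    | succ r =>
      simp only [List.getD_cons_succ] at hc
      have := ih r c (by simpa using hr) hc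
      simp only [markCell, List.getD_cons_succ, List.set_cons_succ, countFalse, List.map_cons,
        List.sum_cons] at *
      omega

-- the work loop of B: pop, guard, mark + accumulate + push the four neighbours
-- (the middle `if h : …` range test is exactly where B's Python raises IndexError;
-- those inputs lie outside Pre_)
def loopB (M : List (List Int)) (m n : Int) (stack : List (Int × Int)) (v : List (List Bool))
    (acc : Int) : Int × List (List Bool) :=
  match stack with
  | [] => (acc, v)
  | (r, c) :: rest =>
    if r < 0 ∨ c < 0 ∨ r > m - 1 ∨ c > n - 1 then loopB M m n rest v acc
    else if h : c.toNat < (M.getD r.toNat []).length ∧ r.toNat < v.length ∧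
        c.toNat < (v.getD r.toNat []).length then
      if hx : getCell M r c = 0 ∨ getVis v r c then loopB M m n rest v acc
      else loopB M m n ((r - 1, c) :: (r + 1, c) :: (r, c - 1) :: (r, c + 1) :: rest)
        (markCell v r.toNat c.toNat) (acc + getCell M r c)
    else loopB M m n rest v acc
termination_by (countFalse v, stack.length)
decreasing_by
  · exact Prod.Lex.right _ (Nat.lt_succ_self _)
  · exact Prod.Lex.right _ (Nat.lt_succ_self _)
  · apply Prod.Lex.left
    apply countFalse_markCell_lt v r.toNat c.toNat h.2.1
    have hvf : getVis v r c = false := by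
      rcases Bool.eq_false_or_eq_true (getVis v r c) with hb | hb
      · exact absurd (Or.inr hb) hx
      · exact hb
    rw [List.getElem?_eq_getElem h.2.2]
    have : (v.getD r.toNat [])[c.toNat] = false := by
      have h1 : (v.getD r.toNat []).getD c.toNat false = false := hvf
      rwa [List.getD_eq_getElem _ _ h.2.2] at h1
    rw [this]
  · exact Prod.Lex.right _ (Nat.lt_succ_self _)

def dfs_alt (M : List (List Int)) (i : Int) (j : Int) (visited : List (List Bool)) :
    Int × List (List Bool) :=
  -- m = len(M), n = len(M[0]); total = 0; stack = [(i, j)]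
  loopB M (M.length : Int) ((M.headD []).length : Int) [(i, j)] visited 0

-- ===== PRECONDITION & SPEC =====
-- Pre_ excludes inputs where Python can raise: empty M (len(M[0]) is an IndexError), and
-- ragged/too-short M or visited on which the DFS actually traverses, where both programs
-- raise IndexError whenever they reach a missing cell; admitted are (a) well-shaped inputs
-- (M's rows and visited at least as large as the m×n grid the guard checks) and (b) any
-- nonempty M whose start cell already fails the guard, so both return (0, visited) at once
-- (on a few ragged inputs whose traversal happens to stay clear of the missing cells A
-- still returns; B returns the same value there — see cites).
def Pre_dfs (M : List (List Int)) (i : Int) (j : Int) (visited : List (List Bool)) : Prop :=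
  M ≠ [] ∧
    (((∀ row ∈ M, (M.headD []).length ≤ row.length) ∧ M.length ≤ visited.length ∧
        (∀ row ∈ visited, (M.headD []).length ≤ row.length)) ∨
      i < 0 ∨ j < 0 ∨ i > (M.length : Int) - 1 ∨ j > ((M.headD []).length : Int) - 1 ∨
      (j.toNat < (M.getD i.toNat []).length ∧ i.toNat < visited.length ∧
        j.toNat < (visited.getD i.toNat []).length ∧
        (getCell M i j = 0 ∨ getVis visited i j)))
instance (M : List (List Int)) (i : Int) (j : Int) (visited : List (List Bool)) :
    Decidable (Pre_dfs M i j visited) := by unfold Pre_dfs; infer_instance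

def pvWitness_dfs : List (List Int) × Int × Int × List (List Bool) :=
  ([[1, 2], [0, 3]], 0, 0, [[false, false], [false, false]])

def Spec_dfs (M : List (List Int)) (i : Int) (j : Int) (visited : List (List Bool)) (out : Int × List (List Bool)) : Prop := out = dfs_alt M i j visited
instance (M : List (List Int)) (i : Int) (j : Int) (visited : List (List Bool)) (out : Int × List (List Bool)) : Decidable (Spec_dfs M i j visited out) := by unfold Spec_dfs; infer_instance

-- ===== CLAIM (what is proved, stated in full; the proofs are below) =====
def Claim_equal_dfs : Prop := ∀ (M : List (List Int)) (i : Int) (j : Int) (visited : List (List Bool)), Dom_dfs M i j visited → Pre_dfs M i j visited → Spec_dfs M i j visited (dfs M i j visited)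

-- ===== LEMMAS AND PROOFS =====

lemma count_set_true_le (row : List Bool) : ∀ (c : Nat),
    (row.set c true).count false ≤ row.count false := by
  induction row with
  | nil => intro c; simp
  | cons a t ih =>
    intro c
    cases c with
    | zero => simp [List.count_cons]
    | succ c =>
      have := ih c
      simp only [List.set_cons_succ, List.count_cons]
      omega

lemma countFalse_markCell_le (v : List (List Bool)) : ∀ (r c : Nat),
    countFalse (markCell v r c) ≤ countFalse v := by
  induction v with
  | nil => intro r c; simp [markCell, countFalse]
  | cons row t ih =>
    intro r c
    cases r with
    | zero =>
      have := count_set_true_le row c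
      simp only [markCell, List.getD_cons_zero, List.set_cons_zero, countFalse, List.map_cons,
        List.sum_cons]
      omega
    | succ r =>
      have := ih r c
      simp only [markCell, List.getD_cons_succ, List.set_cons_succ, countFalse, List.map_cons,
        List.sum_cons] at *
      omega

lemma dfsFuel_mono (M : List (List Int)) : ∀ (f : Nat) (i j : Int) (v : List (List Bool)),
    countFalse (dfsFuel M f i j v).2 ≤ countFalse v := by
  intro f
  induction f with
  | zero => intro i j v; simp [dfsFuel]
  | succ f ih =>
    intro i j v
    rw [dfsFuel]
    split
    · simp
    · simp only
      calc countFalse (dfsFuel M f i (j+1) (dfsFuel M f i (j-1) (dfsFuel M f (i+1) j (dfsFuel M f (i-1) j (markCell v i.toNat j.toNat)).2).2).2).2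
          ≤ countFalse (markCell v i.toNat j.toNat) := le_trans (ih _ _ _) (le_trans (ih _ _ _) (le_trans (ih _ _ _) (ih _ _ _)))
        _ ≤ countFalse v := countFalse_markCell_le v _ _

lemma markCell_length (v : List (List Bool)) (r c : Nat) :
    (markCell v r c).length = v.length := by simp [markCell]

lemma markCell_rows (v : List (List Bool)) (r c : Nat) (n' : Nat)
    (hv : ∀ row ∈ v, n' ≤ row.length) : ∀ row ∈ markCell v r c, n' ≤ row.length := by
  by_cases hr : r < v.length
  · intro row hrow
    rcases List.mem_or_eq_of_mem_set hrow with h | h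
    · exact hv row h
    · subst h
      rw [List.length_set]
      exact hv _ (by rw [List.getD_eq_getElem _ _ hr]; exact List.getElem_mem hr)
  · have heq : markCell v r c = v := by
      unfold markCell
      exact List.set_eq_of_length_le (by omega)
    rw [heq]
    exact hv

lemma dfsFuel_pres (M : List (List Int)) (n' : Nat) : ∀ (f : Nat) (i j : Int) (v : List (List Bool)),
    (dfsFuel M f i j v).2.length = v.length ∧
      ((∀ row ∈ v, n' ≤ row.length) → ∀ row ∈ (dfsFuel M f i j v).2, n' ≤ row.length) := by
  intro f
  induction f with
  | zero => intro i j v; simp [dfsFuel]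
  | succ f ih =>
    intro i j v
    rw [dfsFuel]
    split
    · simp
    · simp only
      constructor
      · rw [(ih _ _ _).1, (ih _ _ _).1, (ih _ _ _).1, (ih _ _ _).1, markCell_length]
      · intro hrows
        exact (ih _ _ _).2 ((ih _ _ _).2 ((ih _ _ _).2 ((ih _ _ _).2
          (markCell_rows _ _ _ _ hrows))))


lemma inbounds_facts (M : List (List Int)) (hM : ∀ row ∈ M, (M.headD []).length ≤ row.length)
    (v : List (List Bool)) (hlen : M.length ≤ v.length)
    (hrows : ∀ row ∈ v, (M.headD []).length ≤ row.length) {i j : Int}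
    (h0 : ¬(i < 0 ∨ j < 0 ∨ i > (M.length : Int) - 1 ∨ j > ((M.headD []).length : Int) - 1)) :
    j.toNat < (M.getD i.toNat []).length ∧ i.toNat < v.length ∧
      j.toNat < (v.getD i.toNat []).length := by
  push_neg at h0
  obtain ⟨h1, h2, h3, h4⟩ := h0
  have hiM : i.toNat < M.length := by omega
  have hn : (M.headD []).length ≤ (M.getD i.toNat []).length :=
    hM _ (by rw [List.getD_eq_getElem _ _ hiM]; exact List.getElem_mem hiM)
  have hjn : j.toNat < (M.headD []).length := by omega
  have hiv : i.toNat < v.length := lt_of_lt_of_le hiM hlen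
  have hnv : (M.headD []).length ≤ (v.getD i.toNat []).length :=
    hrows _ (by rw [List.getD_eq_getElem _ _ hiv]; exact List.getElem_mem hiv)
  exact ⟨by omega, hiv, by omega⟩

lemma loopB_skip (M : List (List Int)) (hM : ∀ row ∈ M, (M.headD []).length ≤ row.length)
    (v : List (List Bool)) (hlen : M.length ≤ v.length)
    (hrows : ∀ row ∈ v, (M.headD []).length ≤ row.length) (i j : Int)
    (rest : List (Int × Int)) (acc : Int)
    (hg : i < 0 ∨ j < 0 ∨ i > (M.length : Int) - 1 ∨ j > ((M.headD []).length : Int) - 1 ∨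
      getCell M i j = 0 ∨ getVis v i j) :
    loopB M (M.length : Int) ((M.headD []).length : Int) ((i, j) :: rest) v acc
      = loopB M (M.length : Int) ((M.headD []).length : Int) rest v acc := by
  rw [loopB]
  by_cases hb : i < 0 ∨ j < 0 ∨ i > (M.length : Int) - 1 ∨ j > ((M.headD []).length : Int) - 1
  · rw [if_pos hb]
  · have hr := inbounds_facts M hM v hlen hrows hb
    have hx : getCell M i j = 0 ∨ getVis v i j := by tauto
    rw [if_neg hb, dif_pos hr, dif_pos hx]

lemma getVis_some_false (v : List (List Bool)) {i j : Int}
    (hb : j.toNat < (v.getD i.toNat []).length) (hvf : getVis v i j = false) :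
    (v.getD i.toNat [])[j.toNat]? = some false := by
  rw [List.getElem?_eq_getElem hb]
  have h1 : (v.getD i.toNat []).getD j.toNat false = false := hvf
  rw [List.getD_eq_getElem _ _ hb] at h1
  exact congrArg some h1

lemma key (M : List (List Int))
    (hM : ∀ row ∈ M, (M.headD []).length ≤ row.length) :
    ∀ (k : Nat) (v : List (List Bool)), countFalse v ≤ k →
      M.length ≤ v.length → (∀ row ∈ v, (M.headD []).length ≤ row.length) →
      ∀ (i j : Int) (rest : List (Int × Int)) (acc : Int) (f : Nat), countFalse v < f →
      loopB M (M.length : Int) ((M.headD []).length : Int) ((i, j) :: rest) v acc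
        = loopB M (M.length : Int) ((M.headD []).length : Int) rest (dfsFuel M f i j v).2
            (acc + (dfsFuel M f i j v).1) := by
  intro k
  induction k with
  | zero =>
    intro v hk hlen hrows i j rest acc f hf
    cases f with
    | zero => omega
    | succ f' =>
      have hg : i < 0 ∨ j < 0 ∨ i > (M.length : Int) - 1 ∨
          j > ((M.headD []).length : Int) - 1 ∨ getCell M i j = 0 ∨ getVis v i j := by
        by_contra hng
        push_neg at hng
        obtain ⟨h1, h2, h3, h4, h5, h6⟩ := hng
        have hb : ¬(i < 0 ∨ j < 0 ∨ i > (M.length : Int) - 1 ∨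
            j > ((M.headD []).length : Int) - 1) := by push_neg; exact ⟨h1, h2, h3, h4⟩
        have hr := inbounds_facts M hM v hlen hrows hb
        have hvf : getVis v i j = false := by simpa using h6
        have := countFalse_markCell_lt v i.toNat j.toNat hr.2.1 (getVis_some_false v hr.2.2 hvf)
        omega
      rw [dfsFuel, if_pos hg]
      rw [loopB_skip M hM v hlen hrows i j rest acc hg]
      norm_num
  | succ k ih =>
    intro v hk hlen hrows i j rest acc f hf
    by_cases hg : i < 0 ∨ j < 0 ∨ i > (M.length : Int) - 1 ∨
        j > ((M.headD []).length : Int) - 1 ∨ getCell M i j = 0 ∨ getVis v i j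
    · cases f with
      | zero => omega
      | succ f' =>
        rw [dfsFuel, if_pos hg]
        rw [loopB_skip M hM v hlen hrows i j rest acc hg]
        norm_num
    · cases f with
      | zero => omega
      | succ f' =>
        push_neg at hg
        obtain ⟨h1, h2, h3, h4, h5, h6⟩ := hg
        have hb : ¬(i < 0 ∨ j < 0 ∨ i > (M.length : Int) - 1 ∨
            j > ((M.headD []).length : Int) - 1) := by push_neg; exact ⟨h1, h2, h3, h4⟩
        have hr := inbounds_facts M hM v hlen hrows hb
        have hvf : getVis v i j = false := by simpa using h6
        have hlt := countFalse_markCell_lt v i.toNat j.toNat hr.2.1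
          (getVis_some_false v hr.2.2 hvf)
        have hx : ¬(getCell M i j = 0 ∨ getVis v i j = true) := by
          intro h; rcases h with h | h
          · exact h5 h
          · rw [hvf] at h; exact Bool.false_ne_true h
        have hguard : ¬(i < 0 ∨ j < 0 ∨ i > (M.length : Int) - 1 ∨
            j > ((M.headD []).length : Int) - 1 ∨ getCell M i j = 0 ∨ getVis v i j) := by
          intro h; rcases h with h | h | h | h | h | h
          · exact absurd (Or.inl h) hb
          · exact absurd (Or.inr (Or.inl h)) hb
          · exact absurd (Or.inr (Or.inr (Or.inl h))) hb
          · exact absurd (Or.inr (Or.inr (Or.inr h))) hb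
          · exact h5 h
          · rw [hvf] at h; exact Bool.false_ne_true h
        -- invariants after marking the cell
        have hlen1 : M.length ≤ (markCell v i.toNat j.toNat).length := by
          rw [markCell_length]; exact hlen
        have hrows1 := markCell_rows v i.toNat j.toNat _ hrows
        -- name the four recursive results of A
        have m1 := dfsFuel_mono M f' (i - 1) j (markCell v i.toNat j.toNat)
        have p1 := dfsFuel_pres M (M.headD []).length f' (i - 1) j (markCell v i.toNat j.toNat)
        have m2 := dfsFuel_mono M f' (i + 1) j (dfsFuel M f' (i - 1) j (markCell v i.toNat j.toNat)).2
        have p2 := dfsFuel_pres M (M.headD []).length f' (i + 1) j (dfsFuel M f' (i - 1) j (markCell v i.toNat j.toNat)).2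
        have m3 := dfsFuel_mono M f' i (j - 1) (dfsFuel M f' (i + 1) j (dfsFuel M f' (i - 1) j (markCell v i.toNat j.toNat)).2).2
        have p3 := dfsFuel_pres M (M.headD []).length f' i (j - 1) (dfsFuel M f' (i + 1) j (dfsFuel M f' (i - 1) j (markCell v i.toNat j.toNat)).2).2
        rw [dfsFuel, if_neg hguard]
        simp only
        rw [loopB, if_neg hb, dif_pos hr, dif_neg hx]
        rw [ih (markCell v i.toNat j.toNat) (by omega) hlen1 hrows1 (i - 1) j _ _ f' (by omega)]
        rw [ih _ (by omega) (by rw [p1.1]; exact hlen1) (p1.2 hrows1) (i + 1) j _ _ f' (by omega)]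
        rw [ih _ (by omega) (by rw [p2.1, p1.1]; exact hlen1) (p2.2 (p1.2 hrows1)) i (j - 1) _ _ f' (by omega)]
        rw [ih _ (by omega) (by rw [p3.1, p2.1, p1.1]; exact hlen1) (p3.2 (p2.2 (p1.2 hrows1))) i (j + 1) _ _ f' (by omega)]
        congr 1
        ring

-- ===== VERDICT (by name: the statement is the Claim_ definition above) =====
theorem dfs_spec : Claim_equal_dfs := by
  intro M i j visited hDom hPre
  unfold Spec_dfs dfs dfs_alt
  obtain ⟨hne, hcase⟩ := hPre
  rcases hcase with ⟨hM, hlen, hv⟩ | htriv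
  · have h := key M hM (countFalse visited) visited le_rfl hlen hv i j [] 0
      (countFalse visited + 1) (Nat.lt_succ_self _)
    rw [h, loopB]
    simp
  · have hguard : i < 0 ∨ j < 0 ∨ i > (M.length : Int) - 1 ∨
        j > ((M.headD []).length : Int) - 1 ∨ getCell M i j = 0 ∨ getVis visited i j := by
      tauto
    rw [dfsFuel, if_pos hguard, loopB]
    by_cases hb : i < 0 ∨ j < 0 ∨ i > (M.length : Int) - 1 ∨ j > ((M.headD []).length : Int) - 1
    · rw [if_pos hb, loopB]
    · have hT : j.toNat < (M.getD i.toNat []).length ∧ i.toNat < visited.length ∧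
          j.toNat < (visited.getD i.toNat []).length ∧
          (getCell M i j = 0 ∨ getVis visited i j) := by tauto
      rw [if_neg hb, dif_pos ⟨hT.1, hT.2.1, hT.2.2.1⟩, dif_pos hT.2.2.2, loopB]
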